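-- pv_equiv track=rewrite | github.com/snailtail/AdventOfCode | 2025/day02.py | part1
-- ===== SOURCE A (Python) =====
-- def part1(data):
--     """finds the invalid IDs by looking for any ID which is made only of some sequence of digits repeated twice"""
--     invalid_ids = []
--     for range_tuple in data:
--         seq = range(range_tuple[0],range_tuple[1]+1)
--         for number in seq:
--             string_of_value = str(number)
--             if len(string_of_value) % 2 != 0:
--                 continue
--             if string_of_value[:len(string_of_value)//2] == string_of_value[len(string_of_value)//2:]:
--                 invalid_ids.append(number)
--     return invalid_ids
-- ===== SOURCE B (Python) =====
-- def part1(data):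
--     """finds the invalid IDs by looking for any ID which is made only of some sequence of digits repeated twice"""
--     invalid_ids = []
--     for range_tuple in data:
--         a, b = range_tuple[0], range_tuple[1]
--         # a doubled ID with half-length k is h*(10**k+1) with 10**(k-1) <= h < 10**k;
--         # generate them directly, in increasing order, clipped to [a, b]
--         kmax = len(str(b)) // 2
--         for k in range(1, kmax + 1):
--             p = 10 ** k
--             rep = p + 1
--             hlo = max(p // 10, -(-a // rep))   # ceil(a / rep)
--             hhi = min(p - 1, b // rep)
--             for h in range(hlo, hhi + 1):
--                 invalid_ids.append(h * rep)
--     return invalid_ids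
-- ===== Notes on version B (the rewrite author's own statement) =====
-- stated objective: faster
-- what changed: Instead of scanning every number in each range and testing its decimal string, B directly generates the doubled numbers h*(10^k+1) per half-length k, clipped to the range bounds.
import Mathlib
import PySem

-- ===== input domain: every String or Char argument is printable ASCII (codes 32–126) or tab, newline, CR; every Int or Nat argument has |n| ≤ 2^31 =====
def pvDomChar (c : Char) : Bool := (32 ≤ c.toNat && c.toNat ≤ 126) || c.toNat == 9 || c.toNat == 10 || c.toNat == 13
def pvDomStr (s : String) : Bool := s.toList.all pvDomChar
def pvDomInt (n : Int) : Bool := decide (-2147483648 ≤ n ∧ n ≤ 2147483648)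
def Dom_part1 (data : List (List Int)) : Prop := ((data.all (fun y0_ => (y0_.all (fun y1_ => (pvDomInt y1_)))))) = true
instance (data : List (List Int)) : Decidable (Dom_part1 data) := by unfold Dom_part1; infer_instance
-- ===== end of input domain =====

-- B replaces A's per-number string test over each whole range by directly generating
-- the doubled numbers h*(10^k+1) per half-length k, clipped to the range bounds.

-- ===== PORT A =====
def part1 (data : List (List Int)) : List Int :=
  data.foldl (fun invalid_ids range_tuple =>
    let seq := PySem.List.pyRange (PySem.List.pyGetD range_tuple 0 0)
      (PySem.List.pyGetD range_tuple 1 0 + 1) 1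
    seq.foldl (fun invalid_ids number =>
      let string_of_value := PySem.Int.toStr number
      if PySem.Int.mod (PySem.Str.len string_of_value) 2 ≠ 0 then invalid_ids
      else if PySem.Str.slice string_of_value none
          (some (PySem.Int.floordiv (PySem.Str.len string_of_value) 2)) ==
          PySem.Str.slice string_of_value
          (some (PySem.Int.floordiv (PySem.Str.len string_of_value) 2)) none then
        invalid_ids ++ [number]
      else invalid_ids) invalid_ids) []

-- ===== PORT B =====
def part1_alt (data : List (List Int)) : List Int :=
  data.foldl (fun invalid_ids range_tuple =>
    let a := PySem.List.pyGetD range_tuple 0 0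
    let b := PySem.List.pyGetD range_tuple 1 0
    let kmax := PySem.Int.floordiv (PySem.Str.len (PySem.Int.toStr b)) 2
    (PySem.List.pyRange 1 (kmax + 1) 1).foldl (fun invalid_ids k =>
      let p : Int := (10 : Int) ^ k.toNat
      let rep := p + 1
      let hlo := max (PySem.Int.floordiv p 10) (-(PySem.Int.floordiv (-a) rep))
      let hhi := min (p - 1) (PySem.Int.floordiv b rep)
      (PySem.List.pyRange hlo (hhi + 1) 1).foldl
        (fun invalid_ids h => invalid_ids ++ [h * rep]) invalid_ids) invalid_ids) []

-- ===== PRECONDITION & SPEC =====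
-- Pre_ excludes inputs containing an inner list of fewer than two elements, on which A raises IndexError.
def Pre_part1 (data : List (List Int)) : Prop := ∀ t ∈ data, 2 ≤ t.length
instance (data : List (List Int)) : Decidable (Pre_part1 data) := by unfold Pre_part1; infer_instance
def pvWitness_part1 : List (List Int) := [[5, 125], [-3, 10]]

def Spec_part1 (data : List (List Int)) (out : List Int) : Prop := out = part1_alt data
instance (data : List (List Int)) (out : List Int) : Decidable (Spec_part1 data out) := by unfold Spec_part1; infer_instance

-- ===== CLAIM (what is proved, stated in full; the proofs are below) =====
def Claim_equal_part1 : Prop := ∀ (data : List (List Int)), Dom_part1 data → Pre_part1 data → Spec_part1 data (part1 data)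

-- ===== LEMMAS AND PROOFS =====

theorem digitChar_inj : ∀ a < 10, ∀ b < 10, Nat.digitChar a = Nat.digitChar b → a = b := by decide

theorem toDigits_ne_nil (m : Nat) : Nat.toDigits 10 m ≠ [] := by
  have := @Nat.length_toDigits_pos 10 m
  intro h; simp [h] at this

-- injectivity of toDigits 10
theorem toDigits_inj : ∀ m m' : Nat, Nat.toDigits 10 m = Nat.toDigits 10 m' → m = m' := by
  intro m
  induction m using Nat.strong_induction_on with
  | _ m ih =>
    intro m' h
    by_cases hm : m < 10 <;> by_cases hm' : m' < 10
    · rw [Nat.toDigits_of_lt_base hm, Nat.toDigits_of_lt_base hm'] at h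
      exact digitChar_inj _ hm _ hm' (List.singleton_inj.mp h)
    · rw [Nat.toDigits_of_lt_base hm, Nat.toDigits_of_base_le (by norm_num) (by omega)] at h
      have := toDigits_ne_nil (m' / 10)
      cases hnd : Nat.toDigits 10 (m' / 10) with
      | nil => exact absurd hnd this
      | cons c t => rw [hnd] at h; simp at h
    · rw [Nat.toDigits_of_lt_base hm', Nat.toDigits_of_base_le (by norm_num) (by omega)] at h
      have := toDigits_ne_nil (m / 10)
      cases hnd : Nat.toDigits 10 (m / 10) with
      | nil => exact absurd hnd this
      | cons c t => rw [hnd] at h; simp at h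
    · rw [Nat.toDigits_of_base_le (n := m) (by norm_num) (by omega), Nat.toDigits_of_base_le (n := m') (by norm_num) (by omega)] at h
      have h2 := List.append_inj' h (by rfl)
      have hq : m / 10 = m' / 10 := ih (m / 10) (by omega) _ h2.1
      have hr : m % 10 = m' % 10 := by
        have := h2.2; simp at this
        exact digitChar_inj _ (Nat.mod_lt _ (by norm_num)) _ (Nat.mod_lt _ (by norm_num)) this
      omega

-- length ↔ bounds
theorem toDigits_len_le_iff {m k : Nat} (hk : 0 < k) : (Nat.toDigits 10 m).length ≤ k ↔ m < 10 ^ k :=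
  Nat.length_toDigits_le_iff (by norm_num) hk

theorem toDigits_len_eq_iff {m k : Nat} (hk : 1 ≤ k) (hm : 0 < m) :
    (Nat.toDigits 10 m).length = k ↔ 10 ^ (k - 1) ≤ m ∧ m < 10 ^ k := by
  constructor
  · intro h
    refine ⟨?_, (toDigits_len_le_iff (by omega)).mp (by omega)⟩
    rcases eq_or_lt_of_le hk with hk1 | hk2
    · simpa [← hk1] using hm
    · by_contra hlt
      have := (toDigits_len_le_iff (m := m) (k := k - 1) (by omega)).mpr (by omega)
      omega
  · rintro ⟨h1, h2⟩
    have hle := (toDigits_len_le_iff (by omega)).mpr h2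
    rcases eq_or_lt_of_le hk with hk1 | hk2
    · have := @Nat.length_toDigits_pos 10 m; omega
    · have : ¬ (Nat.toDigits 10 m).length ≤ k - 1 := by
        rw [toDigits_len_le_iff (by omega)]; omega
      omega

-- appending full digit strings
theorem toDigits_append_gen : ∀ d n : Nat, 0 < n →
    Nat.toDigits 10 (10 ^ (Nat.toDigits 10 d).length * n + d) = Nat.toDigits 10 n ++ Nat.toDigits 10 d := by
  intro d
  induction d using Nat.strong_induction_on with
  | _ d ih =>
    intro n hn
    by_cases hd : d < 10
    · have h := Nat.toDigits_append_toDigits (b := 10) (n := n) (d := d) (by norm_num) hn hd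
      rw [Nat.toDigits_of_lt_base hd] at h ⊢
      simp only [List.length_singleton, pow_one]
      rw [← h]
    · have h10 : 10 ≤ d := by omega
      have hL : (Nat.toDigits 10 d).length = (Nat.toDigits 10 (d / 10)).length + 1 := by
        rw [Nat.toDigits_of_base_le (by norm_num) h10]; simp
      have ihq := ih (d / 10) (by omega) n hn
      have key : 10 ^ (Nat.toDigits 10 d).length * n + d
          = 10 * (10 ^ (Nat.toDigits 10 (d / 10)).length * n + d / 10) + d % 10 := by
        rw [hL]; ring_nf; omega
      rw [key, ← Nat.toDigits_append_toDigits (by norm_num) (by positivity) (Nat.mod_lt _ (by norm_num)), ihq,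
        Nat.toDigits_of_base_le (n := d) (by norm_num) h10]
      rw [Nat.toDigits_of_lt_base (Nat.mod_lt _ (by norm_num))]
      simp

theorem toDigits_drop : ∀ (j m : Nat), 10 ^ j ≤ m →
    ∃ t : List Char, Nat.toDigits 10 m = Nat.toDigits 10 (m / 10 ^ j) ++ t ∧ t.length = j := by
  intro j
  induction j with
  | zero => intro m hm; exact ⟨[], by simp⟩
  | succ j ih =>
    intro m hm
    have hp : (10:Nat) ^ (j+1) = 10 ^ j * 10 := by ring
    have h10 : 10 ≤ m := by
      have h1 : (1:Nat) ≤ 10 ^ j := Nat.one_le_pow _ _ (by norm_num)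
      calc (10:Nat) = 1 * 10 := by ring
        _ ≤ 10 ^ j * 10 := by exact Nat.mul_le_mul_right _ h1
        _ = 10 ^ (j+1) := by ring
        _ ≤ m := hm
    have hq : 10 ^ j ≤ m / 10 := by
      rw [Nat.le_div_iff_mul_le (by norm_num)]; omega
    obtain ⟨t, ht, hlen⟩ := ih (m / 10) hq
    refine ⟨t ++ [(m % 10).digitChar], ?_, by simp [hlen]⟩
    rw [Nat.toDigits_of_base_le (by norm_num) h10, ht]
    have : m / 10 / 10 ^ j = m / 10 ^ (j+1) := by
      rw [Nat.div_div_eq_div_mul]; congr 1; ring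
    rw [this, List.append_assoc]

theorem beq_toList (s t : String) : (s == t) = decide (s.toList = t.toList) := by
  rcases Bool.eq_false_or_eq_true (s == t) with h | h <;> rw [h]
  · have he : s = t := by simpa using h
    subst he; simp
  · have hne : ¬ s = t := by simpa using h
    symm; simp only [decide_eq_false_iff_not]
    exact fun hl => hne (String.toList_inj.mp hl)

def checkA (number : Int) : Bool :=
  let s := PySem.Int.toStr number
  !(decide (PySem.Int.mod (PySem.Str.len s) 2 ≠ 0)) &&
  (PySem.Str.slice s none (some (PySem.Int.floordiv (PySem.Str.len s) 2)) ==
   PySem.Str.slice s (some (PySem.Int.floordiv (PySem.Str.len s) 2)) none)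

theorem checkA_eq (n : Int) :
    checkA n = ((decide ((PySem.Int.toChars n).length % 2 = 0)) &&
      decide ((PySem.Int.toChars n).take ((PySem.Int.toChars n).length / 2)
        = (PySem.Int.toChars n).drop ((PySem.Int.toChars n).length / 2))) := by
  unfold checkA
  have h2 : (2:Int) = ((2:Nat):Int) := by norm_num
  simp only [beq_toList, PySem.Str.toList_slice, PySem.Chars.slice_eq_listSlice,
    PySem.Str.len_eq, PySem.Int.toList_toStr, h2, PySem.Int.mod_natCast, PySem.Int.floordiv_natCast,
    PySem.List.slice_to_natCast, PySem.List.slice_from_natCast]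
  congr 1
  · by_cases h : (PySem.Int.toChars n).length % 2 = 0
    · have h' : ((PySem.Int.toChars n).length : Int) % 2 = 0 := by omega
      simp [h]
    · have h1 : (PySem.Int.toChars n).length % 2 = 1 := by omega
      have h' : ((PySem.Int.toChars n).length : Int) % 2 = 1 := by omega
      simp [h, h']

def doubled (n : Int) : Prop :=
  ∃ k h : Nat, 1 ≤ k ∧ 10 ^ (k - 1) ≤ h ∧ h < 10 ^ k ∧ n = (h : Int) * ((10:Int) ^ k + 1)

theorem check_iff_doubled (n : Int) :
    ((PySem.Int.toChars n).length % 2 = 0 ∧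
      (PySem.Int.toChars n).take ((PySem.Int.toChars n).length / 2)
        = (PySem.Int.toChars n).drop ((PySem.Int.toChars n).length / 2)) ↔ doubled n := by
  constructor
  · rintro ⟨heven, heq⟩
    by_cases hneg : n < 0
    · exfalso
      have hcs : PySem.Int.toChars n = '-' :: Nat.toDigits 10 n.natAbs := by
        unfold PySem.Int.toChars; rw [if_pos hneg]
      rw [hcs] at heven heq
      set D := Nat.toDigits 10 n.natAbs with hD
      have hDpos : 0 < D.length := Nat.length_toDigits_pos
      have hL : ('-' :: D).length = D.length + 1 := by simp
      rw [hL] at heven heq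
      set p := (D.length + 1) / 2 with hp
      have hp1 : 1 ≤ p := by omega
      have hple : p ≤ D.length := by omega
      obtain ⟨q, hq⟩ : ∃ q, p = q + 1 := ⟨p - 1, by omega⟩
      have h1 : (('-' :: D).take p).head? = some '-' := by rw [hq]; simp
      have h2 : (('-' :: D).drop p).head? = D[p-1]? := by rw [hq]; simp
      rw [heq, h2] at h1
      have hmem : D[p-1]'(by omega) ∈ D := List.getElem_mem _
      have h3 : D[p-1]? = some (D[p-1]'(by omega)) := List.getElem?_eq_getElem _
      rw [h3] at h1
      have hdig : (D[p-1]'(by omega)).isDigit = true :=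
        Nat.isDigit_of_mem_toDigits (by norm_num) (by norm_num) hmem
      rw [Option.some_inj.mp h1] at hdig
      exact absurd hdig (by decide)
    · have hcs : PySem.Int.toChars n = Nat.toDigits 10 n.toNat := by
        unfold PySem.Int.toChars; rw [if_neg hneg]
      rw [hcs] at heven heq
      set m := n.toNat with hm
      rcases Nat.eq_zero_or_pos m with hm0 | hmpos
      · exfalso
        rw [hm0, Nat.toDigits_zero] at heven
        simp at heven
      · set L := (Nat.toDigits 10 m).length with hLdef
        have hLpos : 0 < L := Nat.length_toDigits_pos
        set k := L / 2 with hk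
        have hL2k : L = 2 * k := by omega
        have hk1 : 1 ≤ k := by omega
        have hbounds := (toDigits_len_eq_iff (k := L) (by omega) hmpos).mp rfl
        have hup : m < 10 ^ (2*k) := by rw [← hL2k]; exact hbounds.2
        have hlow : 10 ^ (2*k - 1) ≤ m := by rw [← hL2k]; exact hbounds.1
        have hpk : (10:Nat) ^ k ≤ m := le_trans (Nat.pow_le_pow_right (by norm_num) (by omega)) hlow
        obtain ⟨t, ht, htlen⟩ := toDigits_drop k m hpk
        set h := m / 10 ^ k with hh
        have hhup : h < 10 ^ k := by
          rw [hh, Nat.div_lt_iff_lt_mul (by positivity)]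
          calc m < 10 ^ (2*k) := hup
            _ = 10 ^ k * 10 ^ k := by rw [← pow_add]; congr 1; omega
        have hhlow : 10 ^ (k-1) ≤ h := by
          rw [hh, Nat.le_div_iff_mul_le (by positivity)]
          calc 10 ^ (k-1) * 10 ^ k = 10 ^ (2*k - 1) := by rw [← pow_add]; congr 1; omega
            _ ≤ m := hlow
        have hhpos : 0 < h := lt_of_lt_of_le (by positivity) hhlow
        have hLh : (Nat.toDigits 10 h).length = k := by
          rw [toDigits_len_eq_iff hk1 hhpos]; exact ⟨hhlow, hhup⟩
        have htake : (Nat.toDigits 10 m).take k = Nat.toDigits 10 h := by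
          rw [ht, List.take_append_of_le_length (by rw [hLh])]
          rw [List.take_of_length_le (by rw [hLh])]
        have hdrop : (Nat.toDigits 10 m).drop k = t := by
          rw [ht, List.drop_append_of_le_length (by rw [hLh])]
          rw [List.drop_of_length_le (by rw [hLh]), List.nil_append]
        rw [htake, hdrop] at heq
        have hfull : Nat.toDigits 10 m = Nat.toDigits 10 h ++ Nat.toDigits 10 h := by
          rw [ht, ← heq]
        have happ := toDigits_append_gen h h hhpos
        rw [hLh] at happ
        have hmeq : m = 10 ^ k * h + h := toDigits_inj _ _ (by rw [hfull, ← happ])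
        refine ⟨k, h, hk1, hhlow, hhup, ?_⟩
        have hnm : (n : Int) = (m : Int) := by omega
        rw [hnm, hmeq]
        push_cast
        ring
  · rintro ⟨k, h, hk1, hlo, hhi, hn⟩
    have hhpos : 0 < h := lt_of_lt_of_le (by positivity) hlo
    have hnpos : (0:Int) < n := by
      rw [hn]
      have h1 : (0:Int) < (h:Int) := by exact_mod_cast hhpos
      have h2 : (0:Int) < (10:Int)^k + 1 := by positivity
      exact mul_pos h1 h2
    have hmn : n = ((10 ^ k * h + h : Nat) : Int) := by rw [hn]; push_cast; ring
    have hm : n.toNat = 10 ^ k * h + h := by omega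
    have hcs : PySem.Int.toChars n = Nat.toDigits 10 (10 ^ k * h + h) := by
      unfold PySem.Int.toChars; rw [if_neg (by omega), hm]
    rw [hcs]
    have hLh : (Nat.toDigits 10 h).length = k := by
      rw [toDigits_len_eq_iff hk1 hhpos]; exact ⟨hlo, hhi⟩
    have happ := toDigits_append_gen h h hhpos
    rw [hLh] at happ
    rw [happ]
    have hlen : (Nat.toDigits 10 h ++ Nat.toDigits 10 h).length = 2 * k := by
      simp [hLh]; omega
    rw [hlen]
    constructor
    · omega
    · have h2k : 2 * k / 2 = k := by omega
      rw [h2k, List.take_append_of_le_length (by omega), List.drop_append_of_le_length (by omega)]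
      rw [List.take_of_length_le (by omega), List.drop_of_length_le (by omega)]
      simp

theorem eq_of_pairwise_lt : ∀ (l1 l2 : List Int), l1.Pairwise (· < ·) → l2.Pairwise (· < ·) →
    (∀ x, x ∈ l1 ↔ x ∈ l2) → l1 = l2 := by
  intro l1
  induction l1 with
  | nil =>
    intro l2 _ _ hm
    cases l2 with
    | nil => rfl
    | cons b t2 => exact absurd ((hm b).mpr (List.mem_cons_self)) (by simp)
  | cons a t ih =>
    intro l2 h1 h2 hm
    cases l2 with
    | nil => exact absurd ((hm a).mp (List.mem_cons_self)) (by simp)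
    | cons b t2 =>
      have hab : a = b := by
        have ha : a ∈ b :: t2 := (hm a).mp List.mem_cons_self
        have hb : b ∈ a :: t := (hm b).mpr List.mem_cons_self
        rcases List.mem_cons.mp ha with h | h
        · exact h
        · rcases List.mem_cons.mp hb with h' | h'
          · exact h'.symm
          · have h1' := (List.pairwise_cons.mp h1).1 _ h'
            have h2' := (List.pairwise_cons.mp h2).1 _ h
            omega
      subst hab
      congr 1
      refine ih t2 (List.pairwise_cons.mp h1).2 (List.pairwise_cons.mp h2).2 ?_
      intro x
      constructor
      · intro hx
        have hax : a < x := (List.pairwise_cons.mp h1).1 _ hx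
        have := (hm x).mp (List.mem_cons_of_mem _ hx)
        rcases List.mem_cons.mp this with h | h
        · omega
        · exact h
      · intro hx
        have hax : a < x := (List.pairwise_cons.mp h2).1 _ hx
        have := (hm x).mpr (List.mem_cons_of_mem _ hx)
        rcases List.mem_cons.mp this with h | h
        · omega
        · exact h

def kmaxOf (b : Int) : Int := PySem.Int.floordiv (PySem.Str.len (PySem.Int.toStr b)) 2

def blockFor (a b : Int) (k : Int) : List Int :=
  (PySem.List.pyRange
      (max (PySem.Int.floordiv ((10:Int) ^ k.toNat) 10) (-(PySem.Int.floordiv (-a) ((10:Int) ^ k.toNat + 1))))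
      (min ((10:Int) ^ k.toNat - 1) (PySem.Int.floordiv b ((10:Int) ^ k.toNat + 1)) + 1) 1).map
    (fun h => h * ((10:Int) ^ k.toNat + 1))

def genFor (a b : Int) : List Int :=
  (PySem.List.pyRange 1 (kmaxOf b + 1) 1).flatMap (blockFor a b)

-- ceiling bracket
theorem ceil_le_iff (a h rep : Int) (hrep : 0 < rep) :
    -(PySem.Int.floordiv (-a) rep) ≤ h ↔ a ≤ h * rep := by
  rw [neg_le, PySem.Int.le_floordiv_iff_mul_le (hb := hrep)]
  constructor <;> intro hx <;> nlinarith

theorem le_floor_iff (b h rep : Int) (hrep : 0 < rep) :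
    h ≤ PySem.Int.floordiv b rep ↔ h * rep ≤ b := by
  constructor
  · intro hx
    have := (PySem.Int.le_floordiv_iff_mul_le (q := h) (a := b) (b := rep) hrep).mp hx
    linarith
  · intro hx
    exact (PySem.Int.le_floordiv_iff_mul_le (q := h) (a := b) (b := rep) hrep).mpr hx

theorem pow_div_ten (K : Nat) (hK : 1 ≤ K) :
    PySem.Int.floordiv ((10:Int) ^ K) 10 = (10:Int) ^ (K - 1) := by
  rw [PySem.Int.floordiv_eq_ediv_of_pos (by norm_num)]
  have : (10:Int) ^ K = 10 ^ (K - 1) * 10 := by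
    rw [← pow_succ]; congr 1; omega
  rw [this, Int.mul_ediv_cancel _ (by norm_num)]

theorem kmaxOf_eq (b : Int) (hb : 0 ≤ b) :
    kmaxOf b = (((Nat.toDigits 10 b.toNat).length / 2 : Nat) : Int) := by
  unfold kmaxOf
  rw [PySem.Str.len_eq, PySem.Int.toList_toStr]
  have : PySem.Int.toChars b = Nat.toDigits 10 b.toNat := by
    unfold PySem.Int.toChars; rw [if_neg (by omega)]
  rw [this]
  rw [show (2:Int) = ((2:Nat):Int) from by norm_num, PySem.Int.floordiv_natCast]

theorem mem_blockFor {a b k n : Int} (hk : 1 ≤ k) :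
    n ∈ blockFor a b k ↔ ∃ h : Int,
      (10:Int) ^ (k.toNat - 1) ≤ h ∧ h ≤ (10:Int) ^ k.toNat - 1 ∧
      a ≤ n ∧ n ≤ b ∧ n = h * ((10:Int) ^ k.toNat + 1) := by
  have hrep : (0:Int) < (10:Int) ^ k.toNat + 1 := by positivity
  unfold blockFor
  rw [List.mem_map]
  have hK1 : 1 ≤ k.toNat := by omega
  constructor
  · rintro ⟨h, hmem, rfl⟩
    rw [PySem.List.mem_pyRange_one] at hmem
    obtain ⟨hlo, hhi⟩ := hmem
    rw [max_le_iff] at hlo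
    have hhi' : h ≤ min ((10:Int) ^ k.toNat - 1) (PySem.Int.floordiv b (10 ^ k.toNat + 1)) := by omega
    rw [le_min_iff] at hhi'
    refine ⟨h, ?_, hhi'.1, ?_, ?_, rfl⟩
    · rw [pow_div_ten _ hK1] at hlo; exact hlo.1
    · exact (ceil_le_iff a h _ hrep).mp hlo.2
    · exact (le_floor_iff b h _ hrep).mp hhi'.2
  · rintro ⟨h, h1, h2, h3, h4, rfl⟩
    refine ⟨h, ?_, rfl⟩
    rw [PySem.List.mem_pyRange_one, max_le_iff]
    refine ⟨⟨?_, ?_⟩, ?_⟩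
    · rw [pow_div_ten _ hK1]; exact h1
    · exact (ceil_le_iff a h _ hrep).mpr h3
    · have : h ≤ PySem.Int.floordiv b (10 ^ k.toNat + 1) := (le_floor_iff b h _ hrep).mpr h4
      omega

theorem mem_genFor (a b n : Int) : n ∈ genFor a b ↔ a ≤ n ∧ n ≤ b ∧ doubled n := by
  unfold genFor
  rw [List.mem_flatMap]
  constructor
  · rintro ⟨k, hkmem, hnb⟩
    rw [PySem.List.mem_pyRange_one] at hkmem
    obtain ⟨hk1, _⟩ := hkmem
    rw [mem_blockFor hk1] at hnb
    obtain ⟨h, hb1, hb2, hb3, hb4, rfl⟩ := hnb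
    set K := k.toNat with hK
    have hK1 : 1 ≤ K := by omega
    have hpos : (0:Int) < h := lt_of_lt_of_le (by positivity) hb1
    refine ⟨hb3, hb4, K, h.toNat, hK1, ?_, ?_, ?_⟩
    · have : ((10 ^ (K-1) : Nat) : Int) ≤ h := by push_cast; exact hb1
      omega
    · have : h < ((10 ^ K : Nat) : Int) := by push_cast; omega
      omega
    · have hh : ((h.toNat : Nat) : Int) = h := by omega
      rw [hh]
  · rintro ⟨ha, hb, K, hN, hK1, hlo, hhi, rfl⟩
    have hNpos : 0 < hN := lt_of_lt_of_le (by positivity) hlo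
    refine ⟨(K : Int), ?_, ?_⟩
    · rw [PySem.List.mem_pyRange_one]
      constructor
      · exact_mod_cast hK1
      · -- K ≤ kmaxOf b
        have hn11 : (11:Int) ≤ (hN : Int) * ((10:Int) ^ K + 1) := by
          have h1 : (1:Int) ≤ (hN : Int) := by exact_mod_cast hNpos
          have h2 : (11:Int) ≤ (10:Int) ^ K + 1 := by
            have : (10:Int) ≤ 10 ^ K := by
              calc (10:Int) = 10 ^ 1 := by norm_num
                _ ≤ 10 ^ K := by exact pow_le_pow_right₀ (by norm_num) hK1
            omega
          nlinarith
        have hbpos : (0:Int) ≤ b := by omega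
        rw [kmaxOf_eq b hbpos]
        have hlow : 10 ^ (2*K - 1) ≤ b.toNat := by
          have hc : ((hN * (10 ^ K + 1) : Nat) : Int) = (hN : Int) * ((10:Int) ^ K + 1) := by
            push_cast; ring
          have hbn : hN * (10 ^ K + 1) ≤ b.toNat := by omega
          calc 10 ^ (2*K - 1) = 10 ^ (K - 1) * 10 ^ K := by rw [← pow_add]; congr 1; omega
            _ ≤ hN * 10 ^ K := Nat.mul_le_mul_right _ hlo
            _ ≤ hN * (10 ^ K + 1) := Nat.mul_le_mul_left _ (by omega)
            _ ≤ b.toNat := hbn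
        have hlen : 2 * K ≤ (Nat.toDigits 10 b.toNat).length := by
          by_contra hcon
          have := (toDigits_len_le_iff (m := b.toNat) (k := 2*K - 1) (by omega)).mp (by omega)
          omega
        have : K ≤ (Nat.toDigits 10 b.toNat).length / 2 := by omega
        have := Int.ofNat_le.mpr this
        omega
    · rw [mem_blockFor (by exact_mod_cast hK1)]
      refine ⟨(hN : Int), ?_, ?_, ha, hb, ?_⟩
      · simp only [Int.toNat_natCast]
        exact_mod_cast hlo
      · simp only [Int.toNat_natCast]
        have : hN < 10 ^ K := hhi
        have : ((hN:Nat):Int) < ((10 ^ K : Nat):Int) := by exact_mod_cast this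
        push_cast at this
        omega
      · simp only [Int.toNat_natCast]

theorem pairwise_blockFor (a b k : Int) : (blockFor a b k).Pairwise (· < ·) := by
  unfold blockFor
  rw [List.pairwise_map]
  have hrep : (0:Int) < (10:Int) ^ k.toNat + 1 := by positivity
  exact (PySem.List.pairwise_lt_pyRange_one _ _).imp (fun hxy => by
    exact mul_lt_mul_of_pos_right hxy hrep)

theorem pairwise_genFor (a b : Int) : (genFor a b).Pairwise (· < ·) := by
  unfold genFor
  rw [List.pairwise_flatMap]
  refine ⟨fun k _ => pairwise_blockFor a b k, ?_⟩
  refine List.Pairwise.imp_of_mem ?_ (PySem.List.pairwise_lt_pyRange_one 1 (kmaxOf b + 1))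
  intro k1 k2 hm1 hm2 hlt x hx y hy
  rw [PySem.List.mem_pyRange_one] at hm1 hm2
  have hk1 : 1 ≤ k1 := hm1.1
  have hk2 : 1 ≤ k2 := hm2.1
  rw [mem_blockFor hk1] at hx
  rw [mem_blockFor hk2] at hy
  obtain ⟨h1, ha1, ha2, _, _, rfl⟩ := hx
  obtain ⟨h2, hb1, _, _, _, rfl⟩ := hy
  set K1 := k1.toNat with hK1
  set K2 := k2.toNat with hK2
  have hKlt : K1 + 1 ≤ K2 := by omega
  have h1pos : (0:Int) < h1 := lt_of_lt_of_le (by positivity) ha1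
  have e1 : h1 * ((10:Int) ^ K1 + 1) ≤ ((10:Int) ^ K1 - 1) * ((10:Int) ^ K1 + 1) := by
    apply mul_le_mul_of_nonneg_right ha2 (by positivity)
  have e2 : ((10:Int) ^ K1 - 1) * ((10:Int) ^ K1 + 1) = (10:Int) ^ (K1 + K1) - 1 := by
    rw [pow_add]; ring
  have e3 : (10:Int) ^ (K2 - 1) * ((10:Int) ^ K2 + 1) ≤ h2 * ((10:Int) ^ K2 + 1) := by
    apply mul_le_mul_of_nonneg_right hb1 (by positivity)
  have e4 : (10:Int) ^ (K1 + K1) ≤ (10:Int) ^ (K2 - 1) * (10:Int) ^ K2 := by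
    rw [← pow_add]
    exact pow_le_pow_right₀ (by norm_num) (by omega)
  have e5 : (0:Int) < (10:Int) ^ (K2 - 1) := by positivity
  nlinarith

theorem checkA_iff (n : Int) : checkA n = true ↔ doubled n := by
  rw [checkA_eq]
  rw [Bool.and_eq_true, decide_eq_true_eq, decide_eq_true_eq]
  exact check_iff_doubled n

theorem filter_eq_gen (a b : Int) :
    (PySem.List.pyRange a (b + 1) 1).filter checkA = genFor a b := by
  apply eq_of_pairwise_lt
  · exact (PySem.List.pairwise_lt_pyRange_one a (b + 1)).sublist List.filter_sublist
  · exact pairwise_genFor a b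
  · intro x
    rw [List.mem_filter, PySem.List.mem_pyRange_one, mem_genFor, checkA_iff]
    constructor
    · rintro ⟨⟨h1, h2⟩, h3⟩; exact ⟨h1, by omega, h3⟩
    · rintro ⟨h1, h2, h3⟩; exact ⟨⟨h1, by omega⟩, h3⟩

theorem part1_eq (data : List (List Int)) : part1 data =
    data.flatMap (fun t => (PySem.List.pyRange (PySem.List.pyGetD t 0 0)
      (PySem.List.pyGetD t 1 0 + 1) 1).filter checkA) := by
  have hbody : (fun (invalid_ids : List Int) (number : Int) =>
      let string_of_value := PySem.Int.toStr number
      if PySem.Int.mod (PySem.Str.len string_of_value) 2 ≠ 0 then invalid_ids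
      else if PySem.Str.slice string_of_value none
          (some (PySem.Int.floordiv (PySem.Str.len string_of_value) 2)) ==
          PySem.Str.slice string_of_value
          (some (PySem.Int.floordiv (PySem.Str.len string_of_value) 2)) none then
        invalid_ids ++ [number]
      else invalid_ids)
      = fun acc n => if checkA n then acc ++ [n] else acc := by
      funext acc n
      show (if PySem.Int.mod (PySem.Str.len (PySem.Int.toStr n)) 2 ≠ 0 then acc
          else if PySem.Str.slice (PySem.Int.toStr n) none
              (some (PySem.Int.floordiv (PySem.Str.len (PySem.Int.toStr n)) 2)) ==
              PySem.Str.slice (PySem.Int.toStr n)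
              (some (PySem.Int.floordiv (PySem.Str.len (PySem.Int.toStr n)) 2)) none then
            acc ++ [n]
          else acc) = _
      by_cases h1 : PySem.Int.mod (PySem.Str.len (PySem.Int.toStr n)) 2 ≠ 0
      · have hca : checkA n = false := by
          show (!decide (PySem.Int.mod (PySem.Str.len (PySem.Int.toStr n)) 2 ≠ 0) && _) = false
          rw [decide_eq_true_iff.mpr h1]
          rfl
        rw [if_pos h1, if_neg (show ¬ checkA n = true from by rw [hca]; exact Bool.false_ne_true)]
      · have hd : decide (PySem.Int.mod (PySem.Str.len (PySem.Int.toStr n)) 2 ≠ 0) = false :=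
          decide_eq_false h1
        by_cases h2 : (PySem.Str.slice (PySem.Int.toStr n) none
            (some (PySem.Int.floordiv (PySem.Str.len (PySem.Int.toStr n)) 2)) ==
            PySem.Str.slice (PySem.Int.toStr n)
            (some (PySem.Int.floordiv (PySem.Str.len (PySem.Int.toStr n)) 2)) none) = true
        · have hca : checkA n = true := by
            show (!decide (PySem.Int.mod (PySem.Str.len (PySem.Int.toStr n)) 2 ≠ 0) && _) = true
            rw [hd, h2]
            rfl
          rw [if_neg h1, if_pos h2, if_pos hca]
        · have h2f := Bool.eq_false_iff.mpr h2
          have hca : checkA n = false := by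
            show (!decide (PySem.Int.mod (PySem.Str.len (PySem.Int.toStr n)) 2 ≠ 0) && _) = false
            rw [hd, h2f]
            rfl
          rw [if_neg h1, if_neg h2, if_neg (show ¬ checkA n = true from by rw [hca]; exact Bool.false_ne_true)]
  unfold part1
  rw [hbody]
  simp only [PySem.List.foldl_append_if_eq_filter, PySem.List.foldl_append_eq_flatMap,
    List.nil_append]

theorem part1_alt_eq (data : List (List Int)) : part1_alt data =
    data.flatMap (fun t => genFor (PySem.List.pyGetD t 0 0) (PySem.List.pyGetD t 1 0)) := by
  unfold part1_alt
  simp only [PySem.List.foldl_append_singleton_eq_map, PySem.List.foldl_append_eq_flatMap,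
    List.nil_append]
  rfl

-- ===== VERDICT (by name: the statement is the Claim_ definition above) =====
theorem part1_spec : Claim_equal_part1 := by
  intro data _ _
  unfold Spec_part1
  rw [part1_eq, part1_alt_eq]
  simp only [filter_eq_gen]
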